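-- pv_equiv track=rewrite | github.com/Tobillicious/te-kete-ako-production | exa_content_enrichment.py | _year_levels_compatible
-- ===== SOURCE A (Python) =====
-- from typing import List, Dict, Any, Optional
--
-- def _year_levels_compatible(content_years: str, resource_years: List[str]) -> bool:
--     """Check if year levels are compatible."""
--     try:
--         if '-' in content_years:
--             content_range = [int(x) for x in content_years.split('-')]
--             content_set = set(range(content_range[0], content_range[1] + 1))
--         else:
--             content_set = {int(content_years)}
--
--         for year_range in resource_years:
--             if '-' in year_range:
--                 resource_range = [int(x) for x in year_range.split('-')]
--                 resource_set = set(range(resource_range[0], resource_range[1] + 1))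
--             else:
--                 resource_set = {int(year_range)}
--
--             if content_set & resource_set:  # Any overlap
--                 return True
--
--         return False
--     except:
--         return True  # Default to compatible if parsing fails
-- ===== SOURCE B (Python) =====
-- from typing import List
--
-- def _interval(spec: str):
--     """Parse a year spec into an inclusive (lo, hi) pair; lo > hi means empty."""
--     if '-' in spec:
--         p = [int(x) for x in spec.split('-')]
--         return p[0], p[1]
--     v = int(spec)
--     return v, v
--
-- def _year_levels_compatible(content_years: str, resource_years: List[str]) -> bool:
--     """Check if year levels are compatible."""
--     try:
--         clo, chi = _interval(content_years)
--         ivs = [_interval(s) for s in resource_years]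
--     except:
--         return True  # Default to compatible if parsing fails
--     return any(max(clo, lo) <= min(chi, hi) for lo, hi in ivs)
-- ===== Notes on version B (the rewrite author's own statement) =====
-- stated objective: simpler
-- what changed: Two-phase: parse every spec up front into an inclusive (lo,hi) interval pair (any parse failure returns True, coinciding with A's bare-except), then one any() pass testing overlap with max(clo,lo) <= min(chi,hi), instead of A's single loop that materialises set(range(lo,hi+1)) per spec, intersects sets and short-circuits inside the try.
import Mathlib
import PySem

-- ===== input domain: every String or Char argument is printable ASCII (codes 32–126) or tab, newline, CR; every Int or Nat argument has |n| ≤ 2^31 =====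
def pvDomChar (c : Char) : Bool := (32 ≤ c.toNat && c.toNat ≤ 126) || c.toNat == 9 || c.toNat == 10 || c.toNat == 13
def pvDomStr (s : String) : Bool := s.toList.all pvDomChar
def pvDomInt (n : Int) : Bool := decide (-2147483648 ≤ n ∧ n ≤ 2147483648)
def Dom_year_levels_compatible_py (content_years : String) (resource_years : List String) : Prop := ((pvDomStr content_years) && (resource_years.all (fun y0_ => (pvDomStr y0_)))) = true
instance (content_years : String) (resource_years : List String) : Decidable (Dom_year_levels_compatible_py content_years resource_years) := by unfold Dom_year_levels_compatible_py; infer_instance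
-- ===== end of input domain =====

-- B parses all specs up front into inclusive (lo,hi) interval pairs (any parse failure returns
-- True, which coincides with A's bare-except) and then runs one any() overlap pass, instead of
-- A's short-circuit loop over materialised set(range(...)) sets; objective: simpler.

-- ===== PORT A =====
-- parse one spec into the set A builds (none = the int() ValueError inside the try)
def pvASet (s : String) : Option (PySem.Set Int) :=
  if PySem.Str.isIn "-" s then
    match (PySem.Str.split? s "-").getD [] |>.mapM PySem.Int.ofStr? with
    | none => none
    | some r =>
      match r with
      | a :: b :: _ => some (PySem.Set.ofList (PySem.List.pyRange a (b + 1) 1))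
      | _ => none          -- unreachable: '-' in s gives ≥ 2 split parts (would be IndexError)
  else
    (PySem.Int.ofStr? s).map (fun v => PySem.Set.ofList [v])

-- the for-loop over resource_years; none = an exception escaped to the except
def pvALoop (cset : PySem.Set Int) : List String → Option Bool
  | [] => some false
  | yr :: rest =>
    match pvASet yr with
    | none => none
    | some rset =>
      if PySem.Set.inter cset rset = [] then pvALoop cset rest else some true

def year_levels_compatible_py (content_years : String) (resource_years : List String) : Bool :=
  match pvASet content_years with
  | none => true
  | some cset => (pvALoop cset resource_years).getD true

-- ===== PORT B =====
-- _interval: one spec as an inclusive (lo, hi) pair; none = the int() ValueError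
def pvInterval (s : String) : Option (Int × Int) :=
  if PySem.Str.isIn "-" s then
    match (PySem.Str.split? s "-").getD [] |>.mapM PySem.Int.ofStr? with
    | none => none
    | some p =>
      match p with
      | a :: b :: _ => some (a, b)
      | _ => none
  else
    (PySem.Int.ofStr? s).map (fun v => (v, v))

def year_levels_compatible_py_alt (content_years : String) (resource_years : List String) : Bool :=
  match pvInterval content_years, resource_years.mapM pvInterval with
  | some (clo, chi), some ivs => ivs.any (fun p => decide (max clo p.1 ≤ min chi p.2))
  | _, _ => true

-- ===== PRECONDITION & SPEC =====
def Spec_year_levels_compatible_py (content_years : String) (resource_years : List String) (out : Bool) : Prop := out = year_levels_compatible_py_alt content_years resource_years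
instance (content_years : String) (resource_years : List String) (out : Bool) : Decidable (Spec_year_levels_compatible_py content_years resource_years out) := by unfold Spec_year_levels_compatible_py; infer_instance

-- ===== CLAIM (what is proved, stated in full; the proofs are below) =====
def Claim_equal_year_levels_compatible_py : Prop := ∀ (content_years : String) (resource_years : List String), Dom_year_levels_compatible_py content_years resource_years → Spec_year_levels_compatible_py content_years resource_years (year_levels_compatible_py content_years resource_years)

-- ===== LEMMAS AND PROOFS =====

-- A's parsed set is exactly the closed range of B's parsed interval
theorem pvASet_eq_map_pvInterval (s : String) :
    pvASet s = (pvInterval s).map (fun p => PySem.Set.ofList (PySem.List.pyRange p.1 (p.2 + 1) 1)) := by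
  unfold pvASet pvInterval
  split
  · cases ((PySem.Str.split? s "-").getD []).mapM PySem.Int.ofStr? with
    | none => rfl
    | some r =>
      match r with
      | [] => rfl
      | [a] => rfl
      | a :: b :: t => rfl
  · cases PySem.Int.ofStr? s with
    | none => rfl
    | some v => simp [PySem.List.pyRange_one_singleton]

-- set-intersection emptiness of two closed ranges is the max/min interval test
theorem pvInter_empty_iff (a b c d : Int) :
    (PySem.Set.inter (PySem.Set.ofList (PySem.List.pyRange a (b + 1) 1))
        (PySem.Set.ofList (PySem.List.pyRange c (d + 1) 1)) = []) ↔ ¬ (max a c ≤ min b d) := by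
  rw [List.eq_nil_iff_forall_not_mem]
  constructor
  · intro h hle
    exact h (max a c) (by
      rw [PySem.Set.mem_inter]
      constructor <;> rw [PySem.Set.mem_ofList, PySem.List.mem_pyRange_one] <;> omega)
  · intro h x hx
    rw [PySem.Set.mem_inter, PySem.Set.mem_ofList, PySem.Set.mem_ofList,
        PySem.List.mem_pyRange_one, PySem.List.mem_pyRange_one] at hx
    exact h (by omega)

-- A's short-circuit loop agrees with B's parse-all-then-any pass (True coincides for both
-- the exception-first and the overlap-first case, since the result is just a Bool)
theorem pvLoop_eq_any (a b : Int) (rs : List String) :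
    (pvALoop (PySem.Set.ofList (PySem.List.pyRange a (b + 1) 1)) rs).getD true =
      (match rs.mapM pvInterval with
       | none => true
       | some ivs => ivs.any (fun p => decide (max a p.1 ≤ min b p.2))) := by
  induction rs with
  | nil => rfl
  | cons yr rest ih =>
    unfold pvALoop
    rw [pvASet_eq_map_pvInterval]
    simp only [List.mapM_cons]
    cases hy : pvInterval yr with
    | none => rfl
    | some p =>
      simp only [Option.map_some]
      by_cases hov : max a p.1 ≤ min b p.2
      · rw [if_neg (by rw [pvInter_empty_iff]; exact fun h => h hov)]
        cases hrest : rest.mapM pvInterval with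
        | none => simp
        | some ivs =>
          show true = (p :: ivs).any (fun q => decide (max a q.1 ≤ min b q.2))
          rw [List.any_cons, decide_eq_true hov, Bool.true_or]
      · rw [if_pos ((pvInter_empty_iff a b p.1 p.2).mpr hov), ih]
        cases hrest : rest.mapM pvInterval with
        | none => simp
        | some ivs =>
          show _ = (p :: ivs).any (fun q => decide (max a q.1 ≤ min b q.2))
          rw [List.any_cons, decide_eq_false hov, Bool.false_or]

-- ===== VERDICT (by name: the statement is the Claim_ definition above) =====
theorem year_levels_compatible_py_spec : Claim_equal_year_levels_compatible_py := by
  intro c rs _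
  unfold Spec_year_levels_compatible_py year_levels_compatible_py year_levels_compatible_py_alt
  rw [pvASet_eq_map_pvInterval]
  cases pvInterval c with
  | none => cases rs.mapM pvInterval <;> rfl
  | some p =>
    simp only [Option.map_some]
    rw [pvLoop_eq_any]
    cases rs.mapM pvInterval <;> rfl
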